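-- pv_equiv track=rewrite | github.com/VincentZhangOR/HuaLuCup | related.py | cal_time
-- ===== SOURCE A (Python) =====
-- m = {1:31, 3:31, 5:31, 7:31, 8:31, 10:31, 12:31, 4:30, 6:30, \
-- 		9:30, 11:30, 2:28}
--
-- def cal_time(mon, day, hour):
-- 	monN, dayN, hourN = int(mon), int(day), int(hour)
-- 	cur = 4
-- 	total = 0
-- 	if monN >= 4:
-- 		while monN > cur:
-- 			total += m[cur] * 24
-- 			cur += 1
--
-- 	else:
-- 		total += (30+31+30+31+31+30+31+30+31) * 24
-- 		while monN > cur: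
-- 			total += m[cur] * 24
-- 			cur += 1
-- 	total += (dayN-1) * 24
-- 	total += hourN
-- 	return total
-- ===== SOURCE B (Python) =====
-- # Prefix-table reimplementation: cumulative days since April 1 per month,
-- # replacing both while-loop accumulations with a single dict lookup.
-- _cum = {4: 0, 5: 30, 6: 61, 7: 91, 8: 122, 9: 153, 10: 183, 11: 214, 12: 244, 13: 275}
--
-- def cal_time(mon, day, hour):
--     monN, dayN, hourN = int(mon), int(day), int(hour)
--     if monN >= 4:
--         total = _cum[monN] * 24
--     else:
--         # Jan-Mar: A adds the whole Apr-Dec span (275 days) and its loop never runs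
--         total = 275 * 24
--     return total + (dayN - 1) * 24 + hourN
-- ===== Notes on version B (the rewrite author's own statement) =====
-- stated objective: simpler
-- what changed: Replaced both while-loop month-by-month accumulations with a precomputed cumulative-days prefix table looked up once (Jan-Mar keeps A's fixed 275-day constant, whose loop never runs).
import Mathlib
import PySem

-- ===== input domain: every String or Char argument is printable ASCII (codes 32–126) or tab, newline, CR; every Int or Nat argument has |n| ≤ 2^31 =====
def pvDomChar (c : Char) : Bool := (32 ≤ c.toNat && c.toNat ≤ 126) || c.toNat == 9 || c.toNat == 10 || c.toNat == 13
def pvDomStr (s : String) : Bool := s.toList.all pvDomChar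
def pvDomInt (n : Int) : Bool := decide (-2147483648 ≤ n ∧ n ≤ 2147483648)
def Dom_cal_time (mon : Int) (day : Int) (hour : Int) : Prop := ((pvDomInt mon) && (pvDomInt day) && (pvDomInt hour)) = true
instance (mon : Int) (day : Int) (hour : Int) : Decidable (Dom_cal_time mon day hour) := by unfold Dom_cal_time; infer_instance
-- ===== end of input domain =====

-- B replaces A's two while-loop month accumulations with one cumulative-days prefix-table lookup (objective: simpler).

-- ===== PORT A =====
-- the module-level dict m (month lengths)
def mDict : PySem.Dict Int Int :=
  PySem.Dict.ofList [(1, 31), (3, 31), (5, 31), (7, 31), (8, 31), (10, 31), (12, 31),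
                     (4, 30), (6, 30), (9, 30), (11, 30), (2, 28)]

-- A's 'while monN > cur: total += m[cur]*24; cur += 1', run for (monN - cur).toNat steps.
-- m[cur] for a missing key is a KeyError in Python (only reachable for monN ≥ 14, outside
-- Pre_cal_time); getD … 0 stands in there and is exact on all admitted inputs.
def calLoopA : Nat → Int → Int → Int
  | 0, _, total => total
  | n + 1, cur, total => calLoopA n (cur + 1) (total + (mDict.getD cur 0) * 24)

def cal_time (mon : Int) (day : Int) (hour : Int) : Int :=
  -- int(mon) etc. are the identity on Int arguments
  let monN := mon
  let dayN := day
  let hourN := hour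
  let total : Int :=
    if monN ≥ 4 then
      calLoopA (monN - 4).toNat 4 0
    else
      calLoopA (monN - 4).toNat 4 ((30 + 31 + 30 + 31 + 31 + 30 + 31 + 30 + 31) * 24)
  total + (dayN - 1) * 24 + hourN

-- ===== PORT B =====
-- cumulative days since April 1 at the start of each month
def cumDict : PySem.Dict Int Int :=
  PySem.Dict.ofList [(4, 0), (5, 30), (6, 61), (7, 91), (8, 122), (9, 153),
                     (10, 183), (11, 214), (12, 244), (13, 275)]

def cal_time_alt (mon : Int) (day : Int) (hour : Int) : Int :=
  let monN := mon
  let dayN := day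
  let hourN := hour
  -- _cum[monN] is a KeyError for monN ≥ 14, outside Pre_cal_time; getD … 0 stands in there
  let total : Int := if monN ≥ 4 then (cumDict.getD monN 0) * 24 else 275 * 24
  total + (dayN - 1) * 24 + hourN

-- ===== PRECONDITION & SPEC =====
-- Pre_ excludes mon ≥ 14: there A's loop reads m[13], a key m does not have, and raises
-- KeyError (B's table lookup raises KeyError there too); mon ≤ 13 is exactly where A returns.
def Pre_cal_time (mon : Int) (day : Int) (hour : Int) : Prop := mon ≤ 13
instance (mon : Int) (day : Int) (hour : Int) : Decidable (Pre_cal_time mon day hour) := by unfold Pre_cal_time; infer_instance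

def pvWitness_cal_time : Int × Int × Int := (7, 15, 9)

def Spec_cal_time (mon : Int) (day : Int) (hour : Int) (out : Int) : Prop := out = cal_time_alt mon day hour
instance (mon : Int) (day : Int) (hour : Int) (out : Int) : Decidable (Spec_cal_time mon day hour out) := by unfold Spec_cal_time; infer_instance

-- ===== CLAIM (what is proved, stated in full; the proofs are below) =====
def Claim_equal_cal_time : Prop := ∀ (mon : Int) (day : Int) (hour : Int), Dom_cal_time mon day hour → Pre_cal_time mon day hour → Spec_cal_time mon day hour (cal_time mon day hour)

-- ===== LEMMAS AND PROOFS =====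

-- ===== VERDICT (by name: the statement is the Claim_ definition above) =====
theorem cal_time_spec : Claim_equal_cal_time := by
  intro mon day hour _ hpre
  unfold Spec_cal_time cal_time cal_time_alt Pre_cal_time at *
  by_cases h4 : mon ≥ 4
  · have h13 : mon ≤ 13 := hpre
    interval_cases mon <;>
      norm_num [calLoopA] <;> decide
  · have h0 : (mon - 4).toNat = 0 := by omega
    simp [h4, h0, calLoopA]
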